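-- pv_equiv track=rewrite | github.com/seokcode/Python_Codingtest | programmers/[고득점Kit][브루트포스]/모의고사_고찰후.py | solution
-- ===== SOURCE A (Python) =====
-- def solution(answers):
--     answer = []
--     temp = -99
--
--     pattern1 = [1, 2, 3, 4, 5]
--     pattern2 = [2, 1, 2, 3, 2, 4, 2, 5]
--     pattern3 = [3, 3, 1, 1, 2, 2, 4, 4, 5, 5]
--     count = [0, 0, 0]
--
--     for index, num in enumerate(answers):
--         if num == pattern1[index % len(pattern1)]:
--             count[0] += 1
--         if num == pattern2[index % len(pattern2)]:
--             count[1] += 1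
--         if num == pattern3[index % len(pattern3)]:
--             count[2] += 1
--
--     for index, result in enumerate(count):
--         if temp == -99 or temp == result:
--             temp = result
--             answer.append(index + 1)
--         elif temp < result:
--             temp = result
--             answer = []
--             answer.append(index + 1)
--
--     return answer
-- ===== SOURCE B (Python) =====
-- def solution(answers):
--     # Histogram approach: one pass builds a frequency table keyed by
--     # (index mod 40, answer) -- 40 = lcm of the three pattern lengths, so each
--     # pattern's prediction depends only on the index mod 40.  Each pattern's
--     # score is then a sum of 40 table lookups; no pattern ever scans answers.
--     freq = {}
--     for i, a in enumerate(answers):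
--         key = (i % 40, a)
--         freq[key] = freq.get(key, 0) + 1
--     patterns = [[1, 2, 3, 4, 5],
--                 [2, 1, 2, 3, 2, 4, 2, 5],
--                 [3, 3, 1, 1, 2, 2, 4, 4, 5, 5]]
--     scores = [sum(freq.get((r, p[r % len(p)]), 0) for r in range(40))
--               for p in patterns]
--     best = max(scores)
--     return [k + 1 for k, s in enumerate(scores) if s == best]
-- ===== Notes on version B (the rewrite author's own statement) =====
-- stated objective: alternative
-- what changed: Replaces A's per-element three-way pattern comparison plus stateful temp/reset tie loop by a histogram: one pass builds a dict keyed by (index mod 40, answer) (40 = lcm of the pattern lengths), each pattern's score is a sum of 40 dictionary lookups, and winners are taken by max() plus an index filter.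
import Mathlib
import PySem

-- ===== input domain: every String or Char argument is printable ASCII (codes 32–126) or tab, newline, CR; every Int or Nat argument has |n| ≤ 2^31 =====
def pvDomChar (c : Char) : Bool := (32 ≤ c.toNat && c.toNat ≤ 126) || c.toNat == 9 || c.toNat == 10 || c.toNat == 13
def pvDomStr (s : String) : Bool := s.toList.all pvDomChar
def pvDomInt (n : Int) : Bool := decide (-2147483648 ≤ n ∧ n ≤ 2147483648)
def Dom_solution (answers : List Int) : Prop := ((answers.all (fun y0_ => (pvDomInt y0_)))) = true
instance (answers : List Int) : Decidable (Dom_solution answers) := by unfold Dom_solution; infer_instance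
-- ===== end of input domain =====

-- B replaces A's combined per-element three-way comparison pass and stateful
-- temp/reset tie loop by a (index mod 40, answer) histogram dict — each
-- pattern's score becomes 40 lookups — followed by max-and-filter (alternative, same cost).


-- ===== PORT A =====
def pvPat1 : List Int := [1, 2, 3, 4, 5]
def pvPat2 : List Int := [2, 1, 2, 3, 2, 4, 2, 5]
def pvPat3 : List Int := [3, 3, 1, 1, 2, 2, 4, 4, 5, 5]

-- body of A's first loop (one step over (index, num))
def pvStepCount (c : Int × Int × Int) (ia : Int × Int) : Int × Int × Int :=
  let c0 := if ia.2 = PySem.List.pyGetD pvPat1 (PySem.Int.mod ia.1 (pvPat1.length : Int)) 0 then c.1 + 1 else c.1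
  let c1 := if ia.2 = PySem.List.pyGetD pvPat2 (PySem.Int.mod ia.1 (pvPat2.length : Int)) 0 then c.2.1 + 1 else c.2.1
  let c2 := if ia.2 = PySem.List.pyGetD pvPat3 (PySem.Int.mod ia.1 (pvPat3.length : Int)) 0 then c.2.2 + 1 else c.2.2
  (c0, c1, c2)

-- body of A's second loop over (index, result), state = (temp, answer)
def pvStepTemp (s : Int × List Int) (ir : Int × Int) : Int × List Int :=
  if s.1 = -99 ∨ s.1 = ir.2 then (ir.2, s.2 ++ [ir.1 + 1])
  else if s.1 < ir.2 then (ir.2, [ir.1 + 1])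
  else s

def solution (answers : List Int) : List Int :=
  let count := (PySem.List.enumerate answers 0).foldl pvStepCount (0, 0, 0)
  ((PySem.List.enumerate [count.1, count.2.1, count.2.2] 0).foldl pvStepTemp (-99, [])).2

-- ===== PORT B =====
-- 'for i, a in enumerate(answers): key = (i % 40, a); freq[key] = freq.get(key, 0) + 1'
def pvFreq (answers : List Int) : PySem.Dict (Int × Int) Int :=
  (PySem.List.enumerate answers 0).foldl
    (fun d ia =>
      let key := (PySem.Int.mod ia.1 40, ia.2)
      d.insert key (d.getD key 0 + 1))
    PySem.Dict.empty

-- 'sum(freq.get((r, p[r % len(p)]), 0) for r in range(40))'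
def pvScore (freq : PySem.Dict (Int × Int) Int) (p : List Int) : Int :=
  (PySem.List.pyRange 0 40 1).foldl
    (fun s r => s + freq.getD (r, PySem.List.pyGetD p (PySem.Int.mod r (p.length : Int)) 0) 0) 0

def solution_alt (answers : List Int) : List Int :=
  let freq := pvFreq answers
  let patterns : List (List Int) :=
    [[1, 2, 3, 4, 5], [2, 1, 2, 3, 2, 4, 2, 5], [3, 3, 1, 1, 2, 2, 4, 4, 5, 5]]
  let scores := patterns.map (fun p => pvScore freq p)
  let best := (PySem.List.max? scores (fun x => x)).getD 0
  ((PySem.List.enumerate scores 0).filter (fun ic => ic.2 = best)).map (fun ic => ic.1 + 1)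

-- ===== PRECONDITION & SPEC =====
def Spec_solution (answers : List Int) (out : List Int) : Prop := out = solution_alt answers
instance (answers : List Int) (out : List Int) : Decidable (Spec_solution answers out) := by unfold Spec_solution; infer_instance

-- ===== CLAIM (what is proved, stated in full; the proofs are below) =====
def Claim_equal_solution : Prop := ∀ (answers : List Int), Dom_solution answers → Spec_solution answers (solution answers)

-- ===== LEMMAS AND PROOFS =====

-- A's combined fold, component-wise, counts the matches of each pattern
theorem pvFold_fst (l : List (Int × Int)) (a b c : Int) :
    ((l.foldl pvStepCount (a, b, c)).1) =
      a + ((l.filter (fun ia => ia.2 = PySem.List.pyGetD pvPat1 (PySem.Int.mod ia.1 (pvPat1.length : Int)) 0)).length : Int) := by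
  induction l generalizing a b c with
  | nil => simp
  | cons h t ih =>
    simp only [List.foldl_cons, List.filter_cons]
    by_cases hc : h.2 = PySem.List.pyGetD pvPat1 (PySem.Int.mod h.1 (pvPat1.length : Int)) 0 <;>
      simp [pvStepCount, hc, ih] <;> omega

theorem pvFold_snd (l : List (Int × Int)) (a b c : Int) :
    ((l.foldl pvStepCount (a, b, c)).2.1) =
      b + ((l.filter (fun ia => ia.2 = PySem.List.pyGetD pvPat2 (PySem.Int.mod ia.1 (pvPat2.length : Int)) 0)).length : Int) := by
  induction l generalizing a b c with
  | nil => simp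
  | cons h t ih =>
    simp only [List.foldl_cons, List.filter_cons]
    by_cases hc : h.2 = PySem.List.pyGetD pvPat2 (PySem.Int.mod h.1 (pvPat2.length : Int)) 0 <;>
      simp [pvStepCount, hc, ih] <;> omega

theorem pvFold_thd (l : List (Int × Int)) (a b c : Int) :
    ((l.foldl pvStepCount (a, b, c)).2.2) =
      c + ((l.filter (fun ia => ia.2 = PySem.List.pyGetD pvPat3 (PySem.Int.mod ia.1 (pvPat3.length : Int)) 0)).length : Int) := by
  induction l generalizing a b c with
  | nil => simp
  | cons h t ih =>
    simp only [List.foldl_cons, List.filter_cons]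
    by_cases hc : h.2 = PySem.List.pyGetD pvPat3 (PySem.Int.mod h.1 (pvPat3.length : Int)) 0 <;>
      simp [pvStepCount, hc, ih] <;> omega

-- fold with a computed key = fold of the key-mapped list (bridges pvFreq to a plain counter fold)
theorem pvFoldl_counter_map (l : List (Int × Int)) (d : PySem.Dict (Int × Int) Int) :
    l.foldl
      (fun d ia =>
        let key := (PySem.Int.mod ia.1 40, ia.2)
        d.insert key (d.getD key 0 + 1)) d =
    (l.map (fun ia => (PySem.Int.mod ia.1 40, ia.2))).foldl
      (fun d x => d.insert x (d.getD x 0 + 1)) d := by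
  induction l generalizing d with
  | nil => rfl
  | cons x t ih => simp only [List.foldl_cons, List.map_cons]; exact ih _

-- the counter dict: getD = count of the key among the mapped (i % 40, a) pairs
theorem pvFreq_getD (answers : List Int) (v : Int × Int) :
    (pvFreq answers).getD v 0 =
      (((PySem.List.enumerate answers 0).map (fun ia => (PySem.Int.mod ia.1 40, ia.2))).count v : Int) := by
  unfold pvFreq
  rw [pvFoldl_counter_map, PySem.Dict.getD_foldl_insert_add_one]
  simp [PySem.Dict.getD_empty]

-- summing the 0/1 indicator over r ∈ range(40) picks out the single residue class m
theorem pvInd_sum (g : Int → Int) (m v : Int) (hm0 : 0 ≤ m) (hm40 : m < 40) :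
    ((PySem.List.pyRange 0 40 1).map (fun r => if m = r ∧ v = g r then (1 : Int) else 0)).sum =
      if v = g m then 1 else 0 := by
  rw [PySem.List.pyRange_one_append 0 m 40 hm0 (le_of_lt hm40),
    PySem.List.pyRange_one_cons hm40]
  rw [List.map_append, List.sum_append, List.map_cons, List.sum_cons]
  have h1 : ((PySem.List.pyRange 0 m 1).map (fun r => if m = r ∧ v = g r then (1 : Int) else 0)).sum = 0 := by
    apply List.sum_eq_zero
    intro y hy
    rcases List.mem_map.mp hy with ⟨r, hr, hry⟩
    have := (PySem.List.mem_pyRange_one.mp hr).2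
    rw [← hry, if_neg (by rintro ⟨h, -⟩; omega)]
  have h2 : ((PySem.List.pyRange (m + 1) 40 1).map (fun r => if m = r ∧ v = g r then (1 : Int) else 0)).sum = 0 := by
    apply List.sum_eq_zero
    intro y hy
    rcases List.mem_map.mp hy with ⟨r, hr, hry⟩
    have := (PySem.List.mem_pyRange_one.mp hr).1
    rw [← hry, if_neg (by rintro ⟨h, -⟩; omega)]
  rw [h1, h2]
  by_cases hv : v = g m <;> simp [hv]

-- main bridge: summing the histogram lookups over range(40) = the match count of p
theorem pvSum_count_eq_filter (p : List Int) (le : Int)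
    (hpos : 0 < le) (hdvd : le ∣ 40) (l : List (Int × Int)) :
    ((PySem.List.pyRange 0 40 1).map (fun r =>
        (((l.map (fun ia => (PySem.Int.mod ia.1 40, ia.2))).count
            (r, PySem.List.pyGetD p (PySem.Int.mod r le) 0) : Nat) : Int))).sum =
      ((l.filter (fun ia => ia.2 = PySem.List.pyGetD p (PySem.Int.mod ia.1 le) 0)).length : Int) := by
  induction l with
  | nil => simp
  | cons x t ih =>
    have hkey0 : 0 ≤ PySem.Int.mod x.1 40 := PySem.Int.mod_nonneg _ (by norm_num)
    have hkey40 : PySem.Int.mod x.1 40 < 40 := PySem.Int.mod_lt _ (by norm_num)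
    have hmm : PySem.Int.mod (PySem.Int.mod x.1 40) le = PySem.Int.mod x.1 le := by
      rw [PySem.Int.mod_eq_emod_of_pos (by norm_num : (0 : Int) < 40),
        PySem.Int.mod_eq_emod_of_pos hpos, PySem.Int.mod_eq_emod_of_pos hpos]
      exact Int.emod_emod_of_dvd _ hdvd
    simp only [List.map_cons, List.count_cons, Nat.cast_add, Nat.cast_ite, Nat.cast_one,
      Nat.cast_zero, beq_iff_eq, Prod.mk.injEq]
    rw [PySem.List.sum_map_add_int, ih]
    rw [pvInd_sum (fun r => PySem.List.pyGetD p (PySem.Int.mod r le) 0) _ _ hkey0 hkey40, hmm]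
    simp only [List.filter_cons]
    by_cases hx : x.2 = PySem.List.pyGetD p (PySem.Int.mod x.1 le) 0 <;> simp [hx] <;> push_cast <;> omega

-- B's score of pattern p equals the A-side match count of p
theorem pvScore_eq_filter (answers : List Int) (p : List Int)
    (hpos : 0 < (p.length : Int)) (hdvd : (p.length : Int) ∣ 40) :
    pvScore (pvFreq answers) p =
      (((PySem.List.enumerate answers 0).filter
          (fun ia => ia.2 = PySem.List.pyGetD p (PySem.Int.mod ia.1 (p.length : Int)) 0)).length : Int) := by
  unfold pvScore
  rw [PySem.List.foldl_add]
  simp only [pvFreq_getD]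
  rw [pvSum_count_eq_filter p (p.length : Int) hpos hdvd (PySem.List.enumerate answers 0)]
  ring

-- A's second loop on a nonnegative triple equals B's max-and-filter
set_option maxHeartbeats 1000000 in
theorem pvTemp_eq_maxFilter (a b c : Int) (ha : 0 ≤ a) (hb : 0 ≤ b) (hc : 0 ≤ c) :
    ((PySem.List.enumerate ([a, b, c] : List Int) 0).foldl pvStepTemp (-99, [])).2 =
      ((PySem.List.enumerate ([a, b, c] : List Int) 0).filter
          (fun ic => ic.2 = (PySem.List.max? [a, b, c] (fun x => x)).getD 0)).map (fun ic => ic.1 + 1) := by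
  have hM : ∃ m, PySem.List.max? ([a, b, c] : List Int) (fun x => x) = some m ∧
      (m = a ∨ m = b ∨ m = c) ∧ a ≤ m ∧ b ≤ m ∧ c ≤ m := by
    rcases hmem : PySem.List.max? ([a, b, c] : List Int) (fun x => x) with _ | m
    · exfalso
      simp only [PySem.List.max?, List.foldl_cons, List.foldl_nil] at hmem
      by_cases h1 : a < b <;> by_cases h2 : a < c <;> by_cases h3 : b < c <;> simp_all
    · have h1 := PySem.List.max?_mem hmem
      have h2a := PySem.List.max?_isMax hmem a (by simp)
      have h2b := PySem.List.max?_isMax hmem b (by simp)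
      have h2c := PySem.List.max?_isMax hmem c (by simp)
      simp at h1 h2a h2b h2c
      exact ⟨m, rfl, h1, h2a, h2b, h2c⟩
  obtain ⟨m, hm, hmem, hma, hmb, hmc⟩ := hM
  rw [hm]
  simp only [PySem.List.enumerate_cons, PySem.List.enumerate_nil, List.foldl_cons, List.foldl_nil,
    List.filter_cons, List.filter_nil, pvStepTemp, Option.getD_some]
  split_ifs <;> simp_all <;> omega

theorem solution_eq (answers : List Int) : solution answers = solution_alt answers := by
  unfold solution solution_alt
  simp only [List.map_cons, List.map_nil]
  rw [show (PySem.List.enumerate answers 0).foldl pvStepCount (0, 0, 0) =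
      (((PySem.List.enumerate answers 0).foldl pvStepCount (0, 0, 0)).1,
       ((PySem.List.enumerate answers 0).foldl pvStepCount (0, 0, 0)).2.1,
       ((PySem.List.enumerate answers 0).foldl pvStepCount (0, 0, 0)).2.2) from rfl]
  rw [pvFold_fst, pvFold_snd, pvFold_thd]
  simp only [zero_add]
  simp only [pvScore_eq_filter answers [1, 2, 3, 4, 5] (by norm_num) (by norm_num),
    pvScore_eq_filter answers [2, 1, 2, 3, 2, 4, 2, 5] (by norm_num) (by norm_num),
    pvScore_eq_filter answers [3, 3, 1, 1, 2, 2, 4, 4, 5, 5] (by norm_num) (by norm_num),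
    pvPat1, pvPat2, pvPat3]
  rw [pvTemp_eq_maxFilter _ _ _ (by positivity) (by positivity) (by positivity)]
  rfl

-- ===== VERDICT (by name: the statement is the Claim_ definition above) =====
theorem solution_spec : Claim_equal_solution := by
  intro answers _
  unfold Spec_solution
  exact solution_eq answers
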